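-- pv_equiv track=rewrite | github.com/chargen/InterpretorTool | src/interpretertool.py | parse_after_command
-- ===== SOURCE A (Python) =====
-- def parse_after_command(tokens):
-- 	rest=[]
-- 	found_char = False
--
-- 	for token in tokens :
-- 		if(token == '}' or token == ';' or token == '||') :
-- 			found_char = True
--
-- 		if found_char == True :
-- 			rest.append(token)
--
-- 	return rest
-- ===== SOURCE B (Python) =====
-- def parse_after_command(tokens):
--     cut = len(tokens)
--     for d in ('}', ';', '||'):
--         if d in tokens:
--             cut = min(cut, tokens.index(d))
--     return tokens[cut:]
-- ===== Notes on version B (the rewrite author's own statement) =====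
-- stated objective: alternative
-- what changed: Instead of scanning tokens with a found-flag and appending, B locates the earliest occurrence of each of the three delimiters with list.index, takes the minimum position, and returns the slice tokens[cut:].
import Mathlib
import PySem

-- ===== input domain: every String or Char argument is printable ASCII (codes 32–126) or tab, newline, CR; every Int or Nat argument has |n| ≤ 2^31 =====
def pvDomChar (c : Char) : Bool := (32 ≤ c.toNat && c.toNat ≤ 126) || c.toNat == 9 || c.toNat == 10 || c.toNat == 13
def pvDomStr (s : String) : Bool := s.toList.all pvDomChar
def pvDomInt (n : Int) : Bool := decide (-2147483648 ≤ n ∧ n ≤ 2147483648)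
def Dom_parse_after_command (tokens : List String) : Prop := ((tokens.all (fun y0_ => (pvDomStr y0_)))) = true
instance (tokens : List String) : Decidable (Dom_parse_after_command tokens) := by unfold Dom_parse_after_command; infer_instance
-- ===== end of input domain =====

-- B replaces A's found-flag scan by a staged search: find the earliest position of each of the
-- three delimiters with list.index, take the minimum, and slice there (objective: alternative).

-- ===== PORT A =====
-- Port of A: fold over the tokens carrying (rest, found_char), exactly A's loop body.
def pvStepA (st : List String × Bool) (token : String) : List String × Bool :=
  let found := if token = "}" ∨ token = ";" ∨ token = "||" then true else st.2
  (if found = true then st.1 ++ [token] else st.1, found)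

def parse_after_command (tokens : List String) : List String :=
  (tokens.foldl pvStepA ([], false)).1

-- ===== PORT B =====
-- B's loop over the three delimiters: cut = min over present delimiters of their first index.
def pvCut (tokens : List String) : Nat :=
  ["}", ";", "||"].foldl
    (fun cut d => if d ∈ tokens then min cut ((PySem.List.index? tokens d).getD 0) else cut)
    tokens.length

def parse_after_command_alt (tokens : List String) : List String :=
  PySem.List.slice tokens (some ((pvCut tokens : Nat) : Int)) none   -- tokens[cut:]

-- ===== PRECONDITION & SPEC =====
def Spec_parse_after_command (tokens : List String) (out : List String) : Prop := out = parse_after_command_alt tokens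
instance (tokens : List String) (out : List String) : Decidable (Spec_parse_after_command tokens out) := by unfold Spec_parse_after_command; infer_instance

-- ===== CLAIM =====
def Claim_equal_parse_after_command : Prop := ∀ (tokens : List String), Dom_parse_after_command tokens → Spec_parse_after_command tokens (parse_after_command tokens)

-- ===== LEMMAS AND PROOFS =====

def pvP (t : String) : Bool := t = "}" ∨ t = ";" ∨ t = "||"

-- Step equations for A's loop body.
theorem pvStepA_true (acc : List String) (t : String) : pvStepA (acc, true) t = (acc ++ [t], true) := by
  unfold pvStepA; split_ifs <;> simp_all

theorem pvStepA_hit (acc : List String) (t : String) (h : t = "}" ∨ t = ";" ∨ t = "||") :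
    pvStepA (acc, false) t = (acc ++ [t], true) := by
  unfold pvStepA; simp [h]

theorem pvStepA_miss (acc : List String) (t : String) (h : ¬(t = "}" ∨ t = ";" ∨ t = "||")) :
    pvStepA (acc, false) t = (acc, false) := by
  unfold pvStepA; simp [h]

-- Once found_char is true, A's loop appends every remaining token.
theorem pv_fold_found (tokens : List String) (acc : List String) :
    tokens.foldl pvStepA (acc, true) = (acc ++ tokens, true) := by
  induction tokens generalizing acc with
  | nil => simp
  | cons t ts ih => rw [List.foldl_cons, pvStepA_true, ih]; simp

-- A's result is the suffix from the first delimiter onward (drop at findIdx).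
theorem pv_fold_main (tokens : List String) :
    (tokens.foldl pvStepA ([], false)).1 = tokens.drop (tokens.findIdx pvP) := by
  induction tokens with
  | nil => simp
  | cons t ts ih =>
      rw [List.foldl_cons, List.findIdx_cons]
      by_cases h : t = "}" ∨ t = ";" ∨ t = "||"
      · rw [pvStepA_hit _ _ h, pv_fold_found]
        simp [pvP, h]
      · rw [pvStepA_miss _ _ h]
        have hp : pvP t = false := by simp [pvP, h]
        rw [hp]
        simpa using ih

-- B's cut unfolded to a min of the three first-occurrence indices (idxOf = length if absent).
theorem pv_min_idx (L : List String) (d : String) (cut : Nat) (hcut : cut ≤ L.length) :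
    (if d ∈ L then min cut ((List.idxOf? d L).getD 0) else cut) = min cut (L.idxOf d) := by
  by_cases h : d ∈ L
  · obtain ⟨k, hk⟩ := Option.isSome_iff_exists.mp (List.isSome_idxOf?.mpr h)
    have := List.idxOf_eq_getD_idxOf? d L
    rw [if_pos h, hk] at *
    simp_all
  · rw [if_neg h, List.idxOf_eq_length_iff.mpr h]
    omega

theorem pvCut_eq (tokens : List String) :
    pvCut tokens
      = (min (min (min tokens.length (tokens.idxOf "}")) (tokens.idxOf ";")) (tokens.idxOf "||")) := by
  have h1 : tokens.length ≤ tokens.length := le_refl _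
  have h2 : min tokens.length (tokens.idxOf "}") ≤ tokens.length := min_le_left _ _
  have h3 : min (min tokens.length (tokens.idxOf "}")) (tokens.idxOf ";") ≤ tokens.length :=
    le_trans (min_le_left _ _) h2
  simp only [pvCut, List.foldl_cons, List.foldl_nil, PySem.List.index?_eq_idxOf?]
  rw [pv_min_idx _ _ _ h1, pv_min_idx _ _ _ h2, pv_min_idx _ _ _ h3]

-- The min of the three first-occurrence indices is findIdx of the disjunction.
theorem pv_min_eq_findIdx (tokens : List String) :
    (min (min (min tokens.length (tokens.idxOf "}")) (tokens.idxOf ";")) (tokens.idxOf "||"))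
      = tokens.findIdx pvP := by
  induction tokens with
  | nil => simp
  | cons t ts ih =>
      rw [List.findIdx_cons]
      by_cases h : t = "}" ∨ t = ";" ∨ t = "||"
      · have hp : pvP t = true := by simp [pvP, h]
        rw [hp]
        rcases h with h | h | h <;> subst h <;> simp [List.idxOf_cons]
      · push_neg at h
        have hp : pvP t = false := by simp only [pvP, decide_eq_false_iff_not]; tauto
        have e1 : (t == "}") = false := beq_eq_false_iff_ne.mpr h.1
        have e2 : (t == ";") = false := beq_eq_false_iff_ne.mpr h.2.1
        have e3 : (t == "||") = false := beq_eq_false_iff_ne.mpr h.2.2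
        rw [hp]
        simp only [List.idxOf_cons, e1, e2, e3, cond_false, List.length_cons,
          min_add_add_right]
        rw [ih]

-- ===== VERDICT =====
theorem parse_after_command_spec : Claim_equal_parse_after_command := by
  intro tokens _
  unfold Spec_parse_after_command parse_after_command parse_after_command_alt
  rw [PySem.List.slice_from_natCast, pvCut_eq, pv_min_eq_findIdx]
  exact pv_fold_main tokens
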